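-- pv_equiv track=rewrite | github.com/MrBrantCode/unitest_baseline | mut_generate/mist_train_cf/cf_45487/solution.py | unique_sum_mult_powers
-- ===== SOURCE A (Python) =====
-- def unique_sum_mult_powers(arr):
--     if not arr:
--         return None
--
--     # get unique values
--     c = dict((i, arr.count(i)) for i in arr)
--     unique = list(c.keys())
--
--     # count negative and positive values
--     neg_count = len([a for a in unique if a < 0])
--     pos_count = len([a for a in unique if a > 0])
--
--     # calculate the sum of unique values raised to their respective absolute values
--     power_sum = sum([abs(a)**abs(a) for a in unique])
--
--     # multiply the sum by the unique count of positive and negative elements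
--     final_result = power_sum * (neg_count - pos_count)
--
--     return final_result
-- ===== SOURCE B (Python) =====
-- def unique_sum_mult_powers(arr):
--     if not arr:
--         return None
--     neg = pos = power_sum = 0
--     rest = arr
--     while rest:
--         x = rest[0]
--         rest = [y for y in rest[1:] if y != x]
--         power_sum += abs(x) ** abs(x)
--         if x < 0:
--             neg += 1
--         elif x > 0:
--             pos += 1
--     return power_sum * (neg - pos)
-- ===== Notes on version B (the rewrite author's own statement) =====
-- stated objective: alternative
-- what changed: Replaces the count-dict plus three comprehension passes with a worklist loop that takes the first remaining value, accumulates its contribution, and filters all its occurrences out of the rest; no dict, set or counting is used.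
import Mathlib
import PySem

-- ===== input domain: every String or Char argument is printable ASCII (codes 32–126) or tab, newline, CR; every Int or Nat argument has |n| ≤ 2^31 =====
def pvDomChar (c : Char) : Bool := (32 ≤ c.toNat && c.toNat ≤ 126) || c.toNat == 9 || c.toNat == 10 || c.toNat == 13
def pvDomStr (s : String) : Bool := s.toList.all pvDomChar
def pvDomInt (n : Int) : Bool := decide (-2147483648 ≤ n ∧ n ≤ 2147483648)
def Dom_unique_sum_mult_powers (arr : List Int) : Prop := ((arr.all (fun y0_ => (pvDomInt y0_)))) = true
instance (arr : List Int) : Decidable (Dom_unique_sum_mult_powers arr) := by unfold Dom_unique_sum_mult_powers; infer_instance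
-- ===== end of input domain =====

-- B replaces A's count-dict plus three comprehension passes with a worklist loop: take the
-- first remaining value, accumulate its contribution, filter its occurrences out of the rest.

-- ===== PORT A =====
def unique_sum_mult_powers (arr : List Int) : Option Int :=
  if arr = [] then none
  else
    -- c = dict((i, arr.count(i)) for i in arr)
    let c : PySem.Dict Int Int :=
      arr.foldl (fun d i => d.insert i ((PySem.List.count arr i : Int))) PySem.Dict.empty
    let unique : List Int := c.keys
    let neg_count : Int := ((unique.filter (fun a => a < 0)).length : Int)
    let pos_count : Int := ((unique.filter (fun a => a > 0)).length : Int)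
    -- abs(a)**abs(a)
    let power_sum : Int := (unique.map (fun a => ((a.natAbs : Int)) ^ a.natAbs)).sum
    some (power_sum * (neg_count - pos_count))

-- ===== PORT B =====
-- the while loop: state (rest, neg, pos, power_sum); rest strictly shrinks each iteration
def pvLoop (rest : List Int) (neg pos power_sum : Int) : Int × Int × Int :=
  match rest with
  | [] => (neg, pos, power_sum)
  | x :: t =>
    pvLoop (t.filter (fun y => y ≠ x))
      (neg + (if x < 0 then 1 else 0))
      (pos + (if x < 0 then 0 else if x > 0 then 1 else 0))
      (power_sum + ((x.natAbs : Int)) ^ x.natAbs)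
termination_by rest.length
decreasing_by
  have h := List.length_filter_le (fun (y : {y // y ∈ t}) => !decide (↑y = x)) t.attach
  simp at h ⊢
  omega

def unique_sum_mult_powers_alt (arr : List Int) : Option Int :=
  if arr = [] then none
  else
    let acc := pvLoop arr 0 0 0
    some (acc.2.2 * (acc.1 - acc.2.1))

-- ===== PRECONDITION & SPEC =====
def Spec_unique_sum_mult_powers (arr : List Int) (out : Option Int) : Prop := out = unique_sum_mult_powers_alt arr
instance (arr : List Int) (out : Option Int) : Decidable (Spec_unique_sum_mult_powers arr out) := by unfold Spec_unique_sum_mult_powers; infer_instance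

-- ===== CLAIM (what is proved, stated in full; the proofs are below) =====
def Claim_equal_unique_sum_mult_powers : Prop := ∀ (arr : List Int), Dom_unique_sum_mult_powers arr → Spec_unique_sum_mult_powers arr (unique_sum_mult_powers arr)

-- ===== LEMMAS AND PROOFS =====

-- the distinct values of x :: t are, up to permutation, x together with the distinct values of t without x
theorem ofList_cons_perm (x : Int) (t : List Int) :
    (PySem.Set.ofList (x :: t) : List Int).Perm (x :: PySem.Set.ofList (t.filter (fun y => y ≠ x))) := by
  refine (List.perm_ext_iff_of_nodup (PySem.Set.nodup_ofList _) ?_).mpr ?_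
  · refine List.nodup_cons.mpr ⟨?_, PySem.Set.nodup_ofList _⟩
    simp [PySem.Set.mem_ofList, List.mem_filter]
  · intro a
    simp [PySem.Set.mem_ofList, List.mem_filter]
    by_cases h : a = x <;> simp [h]

-- B's loop computes the negative count, positive count and power sum of the distinct values of rest
theorem pvLoop_spec_aux (k : Nat) : ∀ (rest : List Int), rest.length ≤ k → ∀ (n p s : Int),
    pvLoop rest n p s =
      (n + (((PySem.Set.ofList rest : List Int).filter (fun a => a < 0)).length : Int),
       p + (((PySem.Set.ofList rest : List Int).filter (fun a => a > 0)).length : Int),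
       s + ((PySem.Set.ofList rest : List Int).map (fun a => ((a.natAbs : Int)) ^ a.natAbs)).sum) := by
  induction k with
  | zero =>
    intro rest hk n p s
    have hr : rest = [] := List.eq_nil_of_length_eq_zero (Nat.le_zero.mp hk)
    subst hr
    simp [pvLoop, PySem.Set.ofList]
  | succ k ih =>
    intro rest hk n p s
    cases rest with
    | nil => simp [pvLoop, PySem.Set.ofList]
    | cons x t =>
    have ht : (t.filter (fun y => y ≠ x)).length ≤ k := by
      have := List.length_filter_le (fun y => !decide (y = x)) t
      simp at hk ⊢
      omega
    simp only [pvLoop]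
    rw [ih _ ht]
    have hperm := ofList_cons_perm x t
    have h1 : ((PySem.Set.ofList (x :: t) : List Int).filter (fun a => a < 0)).length
        = ((x :: PySem.Set.ofList (t.filter (fun y => y ≠ x))).filter (fun a => a < 0)).length :=
      (hperm.filter _).length_eq
    have h2 : ((PySem.Set.ofList (x :: t) : List Int).filter (fun a => a > 0)).length
        = ((x :: PySem.Set.ofList (t.filter (fun y => y ≠ x))).filter (fun a => a > 0)).length :=
      (hperm.filter _).length_eq
    have h3 : ((PySem.Set.ofList (x :: t) : List Int).map (fun a => ((a.natAbs : Int)) ^ a.natAbs)).sum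
        = ((x :: PySem.Set.ofList (t.filter (fun y => y ≠ x))).map (fun a => ((a.natAbs : Int)) ^ a.natAbs)).sum :=
      (hperm.map _).sum_eq
    rw [h1, h2, h3]
    simp only [List.filter_cons, List.map_cons, List.sum_cons, Prod.ext_iff]
    by_cases hx : x < 0
    · have hx' : ¬ x > 0 := by omega
      simp only [hx, hx', decide_true, decide_false, if_true, if_false, List.length_cons]
      refine ⟨by push_cast; ring, by push_cast; ring, by ring⟩
    · by_cases hx' : x > 0
      · simp only [hx, hx', decide_true, decide_false, if_true, if_false, List.length_cons]
        refine ⟨by push_cast; ring, by push_cast; ring, by ring⟩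
      · simp only [hx, hx', decide_false, if_false]
        refine ⟨by push_cast; ring, by push_cast; ring, by ring⟩

-- ===== VERDICT (by name: the statement is the Claim_ definition above) =====
theorem unique_sum_mult_powers_spec : Claim_equal_unique_sum_mult_powers := by
  intro arr _
  show unique_sum_mult_powers arr = unique_sum_mult_powers_alt arr
  unfold unique_sum_mult_powers unique_sum_mult_powers_alt
  by_cases h : arr = []
  · simp [h]
  · simp only [h, if_false]
    have hkeys :
        (arr.foldl (fun d i => d.insert i ((PySem.List.count arr i : Int))) PySem.Dict.empty).keys
          = PySem.Set.ofList arr := by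
      rw [PySem.Dict.keys_foldl_insert]
      rfl
    rw [hkeys, pvLoop_spec_aux arr.length arr (Nat.le_refl _)]
    ring_nf
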